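-- pv_equiv track=rewrite | github.com/ntnhan0605/docs-ntnhan0605 | algorithm/bigo_blue50/01-dynamic_array-string/night_at_the_museum.py | night_at_the_museum
-- ===== SOURCE A (Python) =====
-- def night_at_the_museum(str):
-- 	total = 0
-- 	temp = 0
-- 	for s in str:
-- 		idx = ord(s) - 97
-- 		delta = abs(temp - idx)
-- 		if delta > 13:
-- 			total += abs(26 - delta)
-- 		else:
-- 			total += delta
-- 		temp = idx
--
-- 	return total
-- ===== SOURCE B (Python) =====
-- def night_at_the_museum(str):
--     # Count each adjacent (prev, cur) character pair (dial starts at 'a'),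
--     # then pay the rotation cost once per distinct pair, times its multiplicity.
--     freq = {}
--     prev = 'a'
--     for c in str:
--         key = (prev, c)
--         freq[key] = freq.get(key, 0) + 1
--         prev = c
--     total = 0
--     for (p, q), n in freq.items():
--         d = abs(ord(p) - ord(q))
--         total += n * min(d, abs(26 - d))
--     return total
-- ===== Notes on version B (the rewrite author's own statement) =====
-- stated objective: alternative
-- what changed: Replaces A's fused single pass with running total and previous-index state by a counting algorithm: a dict tallies the multiplicity of each adjacent character pair, then the rotation cost min(d, |26-d|) is paid once per distinct pair times its count.
import Mathlib
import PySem

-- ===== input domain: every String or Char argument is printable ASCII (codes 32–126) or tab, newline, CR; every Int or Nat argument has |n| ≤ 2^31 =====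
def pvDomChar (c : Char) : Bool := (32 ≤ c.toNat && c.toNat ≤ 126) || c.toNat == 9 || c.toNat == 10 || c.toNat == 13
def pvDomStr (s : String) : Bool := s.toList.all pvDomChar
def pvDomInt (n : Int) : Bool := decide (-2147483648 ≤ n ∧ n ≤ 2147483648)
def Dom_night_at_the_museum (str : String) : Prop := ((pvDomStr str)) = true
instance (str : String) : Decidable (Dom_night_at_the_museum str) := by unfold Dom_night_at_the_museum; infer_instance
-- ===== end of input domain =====

-- B replaces A's fused running-state loop by a counting algorithm: it builds a dict
-- counting each adjacent character pair and then pays the rotation cost once per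
-- DISTINCT pair, multiplied by its multiplicity (alternative algorithm, same O(n) cost).


-- ===== PORT A =====
-- literal port of A: one pass with state (total, temp), branch on delta > 13
def night_at_the_museum (str : String) : Int :=
  (str.toList.foldl (fun (st : Int × Int) s =>
      let idx : Int := (s.toNat : Int) - 97
      let delta : Int := |st.2 - idx|
      (if delta > 13 then st.1 + |26 - delta| else st.1 + delta, idx))
    (0, 0)).1

-- ===== PORT B =====
-- port of B: first loop counts each adjacent (prev, cur) pair into a dict
-- (dial starts at 'a'); second loop sums multiplicity * min(d, |26 - d|) over the items
def night_at_the_museum_alt (str : String) : Int :=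
  let freq : PySem.Dict (Char × Char) Int :=
    (str.toList.foldl
      (fun (st : PySem.Dict (Char × Char) Int × Char) c =>
        (st.1.insert (st.2, c) (st.1.getD (st.2, c) 0 + 1), c))
      (PySem.Dict.empty, 'a')).1
  freq.items.foldl
    (fun total p =>
      let d : Int := |(p.1.1.toNat : Int) - (p.1.2.toNat : Int)|
      total + p.2 * min d (abs (26 - d))) 0

-- ===== PRECONDITION & SPEC =====
def Spec_night_at_the_museum (str : String) (out : Int) : Prop := out = night_at_the_museum_alt str
instance (str : String) (out : Int) : Decidable (Spec_night_at_the_museum str out) := by unfold Spec_night_at_the_museum; infer_instance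

-- ===== CLAIM (what is proved, stated in full; the proofs are below) =====
def Claim_equal_night_at_the_museum : Prop := ∀ (str : String), Dom_night_at_the_museum str → Spec_night_at_the_museum str (night_at_the_museum str)

-- ===== LEMMAS AND PROOFS =====

-- the per-pair rotation cost both sides compute (on characters)
def pvCost (p : Char × Char) : Int :=
  min |(p.1.toNat : Int) - (p.2.toNat : Int)| (abs (26 - |(p.1.toNat : Int) - (p.2.toNat : Int)|))

-- A's branch equals the branch-free min form
theorem pv_cost_eq (t i acc : Int) :
    (if |t - i| > 13 then acc + (abs (26 - |t - i|)) else acc + |t - i|)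
      = acc + min |t - i| (abs (26 - |t - i|)) := by
  rcases abs_cases (t - i) with ⟨h1, h2⟩ | ⟨h1, h2⟩ <;>
    rcases abs_cases (26 - |t - i|) with ⟨h3, h4⟩ | ⟨h3, h4⟩ <;>
      split_ifs <;> rw [min_def] <;> split_ifs <;> omega

-- A's loop sums pvCost over the adjacent-pair list (prev character as state)
theorem pv_A_loop (l : List Char) : ∀ (p : Char) (acc : Int),
    (l.foldl (fun (st : Int × Int) s =>
        let idx : Int := (s.toNat : Int) - 97
        let delta : Int := |st.2 - idx|
        (if delta > 13 then st.1 + |26 - delta| else st.1 + delta, idx)) (acc, (p.toNat : Int) - 97)).1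
      = acc + ((List.zip (p :: l) l).map pvCost).sum := by
  induction l with
  | nil => intro p acc; simp
  | cons c l ih =>
      intro p acc
      simp only [List.foldl, List.zip_cons_cons, List.map, List.sum_cons]
      rw [ih, pv_cost_eq]
      have : |(p.toNat : Int) - 97 - ((c.toNat : Int) - 97)| = |(p.toNat : Int) - (c.toNat : Int)| := by
        congr 1; ring
      rw [this]
      simp only [pvCost]
      rw [add_assoc]

-- B's first loop builds the insert-count fold of the adjacent-pair list
theorem pv_B_build (l : List Char) : ∀ (p : Char) (d : PySem.Dict (Char × Char) Int),
    (l.foldl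
      (fun (st : PySem.Dict (Char × Char) Int × Char) c =>
        (st.1.insert (st.2, c) (st.1.getD (st.2, c) 0 + 1), c)) (d, p))
      = ((List.zip (p :: l) l).foldl (fun d k => d.insert k (d.getD k 0 + 1)) d, (p :: l).getLast (by simp)) := by
  induction l with
  | nil => intro p d; simp
  | cons c l ih =>
      intro p d
      simp only [List.foldl, List.zip_cons_cons]
      rw [ih]
      congr 1

-- B's second loop is the starting value plus the sum of multiplicity * pvCost
theorem pv_B_sum (items : List ((Char × Char) × Int)) : ∀ (a : Int),
    items.foldl
      (fun total p =>
        let d : Int := |(p.1.1.toNat : Int) - (p.1.2.toNat : Int)|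
        total + p.2 * min d (abs (26 - d))) a
      = a + (items.map (fun p => p.2 * pvCost p.1)).sum := by
  induction items with
  | nil => intro a; simp
  | cons x xs ih =>
      intro a
      simp only [List.foldl, List.map, List.sum_cons]
      rw [ih]
      simp only [pvCost]
      ring

-- one cons step of the count-weighted sum over a Nodup key list
theorem pv_count_step (f : Char × Char → Int) (x : Char × Char) (xs : List (Char × Char)) :
    ∀ (keys : List (Char × Char)), keys.Nodup →
      (keys.map (fun k => (((x :: xs).count k : Int)) * f k)).sum
        = (keys.map (fun k => ((xs.count k : Int)) * f k)).sum + (if x ∈ keys then f x else 0) := by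
  intro keys
  induction keys with
  | nil => simp
  | cons k ks ih =>
      intro hnd
      rcases List.nodup_cons.mp hnd with ⟨hk, hnd'⟩
      simp only [List.map, List.sum_cons, ih hnd', List.mem_cons]
      by_cases hxk : x = k
      · subst hxk
        have hx : x ∉ ks := hk
        simp only [List.count_cons_self, if_neg hx]
        rw [if_pos (Or.inl trivial)]
        push_cast
        ring
      · have hcount : (x :: xs).count k = xs.count k := by
          simp [hxk]
        rw [hcount]
        have hcond : (x = k ∨ x ∈ ks) ↔ x ∈ ks :=
          ⟨fun h => h.elim (fun h' => absurd h' hxk) id, Or.inr⟩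
        rw [if_congr hcond rfl rfl, add_assoc]

-- count-weighted sum over the dedup equals the plain mapped sum
theorem pv_sum_count (f : Char × Char → Int) (l : List (Char × Char)) :
    ∀ (keys : List (Char × Char)), keys.Nodup → (∀ x ∈ l, x ∈ keys) →
      (keys.map (fun k => ((l.count k : Int)) * f k)).sum = (l.map f).sum := by
  induction l with
  | nil => intro keys _ _; simp
  | cons x xs ih =>
      intro keys hnd hmem
      rw [pv_count_step f x xs keys hnd, ih keys hnd (fun y hy => hmem y (List.mem_cons_of_mem _ hy)),
        if_pos (hmem x (List.mem_cons_self))]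
      simp [add_comm]

-- ===== VERDICT (by name: the statement is the Claim_ definition above) =====
theorem night_at_the_museum_spec : Claim_equal_night_at_the_museum := by
  intro str _
  unfold Spec_night_at_the_museum night_at_the_museum night_at_the_museum_alt
  have h97 : ((0 : Int), (0 : Int)) = ((0 : Int), ('a'.toNat : Int) - 97) := by decide
  rw [h97, pv_A_loop, pv_B_build]
  simp only [PySem.Dict.foldl_insert_getD_add_one_eq_counter, PySem.Dict.items_counter]
  set P : List (Char × Char) := List.zip ('a' :: str.toList) str.toList with hP
  rw [pv_B_sum]
  rw [List.map_map]
  have : ((PySem.Set.ofList P).map ((fun p => p.2 * pvCost p.1) ∘ fun k => (k, (P.count k : Int))))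
      = (PySem.Set.ofList P).map (fun k => (P.count k : Int) * pvCost k) := by
    simp [Function.comp]
  rw [this, ← PySem.List.dedup_eq_ofList,
    pv_sum_count pvCost P (PySem.List.dedup P) (PySem.List.nodup_dedup P)
      (fun x hx => (PySem.List.mem_dedup P x).mpr hx)]
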